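-- pv_equiv track=rewrite | github.com/MrBrantCode/unitest_baseline | mut_generate/mist_train_cf/cf_67706/solution.py | replace_duplicates_with_max
-- ===== SOURCE A (Python) =====
-- def replace_duplicates_with_max(lst):
--     max_val = max(lst)
--     seen = set()
--     for i in range(len(lst)):
--         if lst[i] in seen:
--             lst[i] = max_val
--         else:
--             seen.add(lst[i])
--     return lst
-- ===== SOURCE B (Python) =====
-- def replace_duplicates_with_max(lst):
--     max_val = max(lst)
--     first = {}
--     for i, v in enumerate(lst):
--         if v not in first:
--             first[v] = i
--     lst[:] = [v if first[v] == i else max_val for i, v in enumerate(lst)]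
--     return lst
-- ===== Notes on version B (the rewrite author's own statement) =====
-- stated objective: alternative
-- what changed: Replaces A's single stateful pass with a growing 'seen' set by two passes: one building a first-occurrence index table, then a comprehension that keeps an element exactly when its index equals its first index.
import Mathlib
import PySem

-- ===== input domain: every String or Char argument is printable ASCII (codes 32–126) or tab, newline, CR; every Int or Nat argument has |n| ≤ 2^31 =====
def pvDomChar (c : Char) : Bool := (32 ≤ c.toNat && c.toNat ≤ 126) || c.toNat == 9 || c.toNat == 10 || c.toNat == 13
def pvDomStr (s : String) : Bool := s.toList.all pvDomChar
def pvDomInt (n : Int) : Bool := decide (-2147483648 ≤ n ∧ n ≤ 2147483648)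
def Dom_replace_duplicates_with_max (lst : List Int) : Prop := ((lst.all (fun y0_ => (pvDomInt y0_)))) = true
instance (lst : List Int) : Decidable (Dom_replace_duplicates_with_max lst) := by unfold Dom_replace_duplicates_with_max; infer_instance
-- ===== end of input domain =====

-- B replaces A's single stateful pass (a growing 'seen' set) with a first-occurrence
-- index table built in one pass plus an index-comparing comprehension (objective: alternative).
-- Both A and B mutate lst in place; the equivalence proved here is about the return value.

-- ===== PORT A =====
-- the for-loop over range(len(lst)): writes only touch indices already read, so each
-- read lst[i] sees the original element; ported as structural recursion carrying 'seen'
def pvLoopA (m : Int) : List Int → PySem.Set Int → List Int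
  | [], _ => []
  | v :: t, seen =>
    if PySem.Set.contains seen v then m :: pvLoopA m t seen
    else v :: pvLoopA m t (PySem.Set.add seen v)

def replace_duplicates_with_max (lst : List Int) : List Int :=
  match PySem.List.max? lst (fun x => x) with
  | none => []   -- Python raises ValueError on [];  excluded by Pre_
  | some m => pvLoopA m lst PySem.Set.empty

-- ===== PORT B =====
-- first pass of Source B: the first-occurrence index dict
def pvFirstIdx (lst : List Int) : PySem.Dict Int Int :=
  (PySem.List.enumerate lst).foldl
    (fun d iv => if d.contains iv.2 then d else d.insert iv.2 iv.1) PySem.Dict.empty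

def replace_duplicates_with_max_alt (lst : List Int) : List Int :=
  match PySem.List.max? lst (fun x => x) with
  | none => []   -- Python raises ValueError on [];  excluded by Pre_
  | some m =>
    let first := pvFirstIdx lst
    -- first[v] always exists here; 'first[v] == i' ported as get? = some i (exact on this domain)
    (PySem.List.enumerate lst).map (fun iv => if first.get? iv.2 = some iv.1 then iv.2 else m)

-- ===== PRECONDITION & SPEC =====
-- Pre_ excludes only the empty list, on which Python's max() raises ValueError in both A and B
def Pre_replace_duplicates_with_max (lst : List Int) : Prop := lst ≠ []
instance (lst : List Int) : Decidable (Pre_replace_duplicates_with_max lst) := by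
  unfold Pre_replace_duplicates_with_max; infer_instance
def pvWitness_replace_duplicates_with_max : List Int := [1, 3, 1, 2]

def Spec_replace_duplicates_with_max (lst : List Int) (out : List Int) : Prop := out = replace_duplicates_with_max_alt lst
instance (lst : List Int) (out : List Int) : Decidable (Spec_replace_duplicates_with_max lst out) := by unfold Spec_replace_duplicates_with_max; infer_instance

-- ===== CLAIM (what is proved, stated in full; the proofs are below) =====
def Claim_equal_replace_duplicates_with_max : Prop := ∀ (lst : List Int), Dom_replace_duplicates_with_max lst → Pre_replace_duplicates_with_max lst → Spec_replace_duplicates_with_max lst (replace_duplicates_with_max lst)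

-- ===== LEMMAS AND PROOFS =====

-- common middle form: element v of the suffix is kept iff it does not occur in the prefix
def pvMid (m : Int) : List Int → List Int → List Int
  | _, [] => []
  | pre, v :: t => (if v ∈ pre then m else v) :: pvMid m (pre ++ [v]) t

theorem pvLoopA_eq_mid (m : Int) (t : List Int) : ∀ pre : List Int,
    pvLoopA m t (PySem.Set.ofList pre) = pvMid m pre t := by
  induction t with
  | nil => intro pre; rfl
  | cons v t ih =>
    intro pre
    have hadd : PySem.Set.add (PySem.Set.ofList pre) v = PySem.Set.ofList (pre ++ [v]) := by
      simp [PySem.Set.ofList_eq_foldl]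
    by_cases h : v ∈ pre
    · have hc : (PySem.Set.ofList pre).contains v = true :=
        (PySem.Set.contains_iff _ _).mpr ((PySem.Set.mem_ofList _ _).mpr h)
      have hnoop : PySem.Set.ofList (pre ++ [v]) = PySem.Set.ofList pre := by
        rw [← hadd]; simp [PySem.Set.add, h]
      simp only [pvLoopA, hc, if_true, pvMid, if_pos h]
      rw [← hnoop]
      exact congrArg (m :: ·) (ih _)
    · have hc : (PySem.Set.ofList pre).contains v = false := by
        rw [Bool.eq_false_iff]
        intro hcon
        exact h ((PySem.Set.mem_ofList _ _).mp ((PySem.Set.contains_iff _ _).mp hcon))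
      simp only [pvLoopA, hc, Bool.false_eq_true, if_false, pvMid, if_neg h]
      rw [hadd]
      exact congrArg (v :: ·) (ih _)

-- first index of v in a list, starting at offset s (matches what pvFirstIdx stores)
def pvFidx (v : Int) : List Int → Int → Option Int
  | [], _ => none
  | x :: t, s => if x = v then some s else pvFidx v t (s + 1)

theorem pvFold_get (t : List Int) : ∀ (s : Int) (d : PySem.Dict Int Int) (v : Int),
    ((PySem.List.enumerate t s).foldl
      (fun d iv => if d.contains iv.2 then d else d.insert iv.2 iv.1) d).get? v =
      match d.get? v with
      | some j => some j
      | none => pvFidx v t s := by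
  induction t with
  | nil => intro s d v; cases h : d.get? v <;> simp [PySem.List.enumerate, h, pvFidx]
  | cons x t ih =>
    intro s d v
    rw [PySem.List.enumerate_cons]
    simp only [List.foldl_cons]
    by_cases hc : d.contains x = true
    · rw [if_pos hc, ih]
      cases h : d.get? v with
      | some j => rfl
      | none =>
        have hvx : x ≠ v := by
          intro he
          have := (PySem.Dict.get?_eq_none_iff_contains _ _).mp h
          rw [he] at hc; exact absurd hc (by simp [this])
        simp [pvFidx, hvx]
    · rw [if_neg hc, ih]
      by_cases hvx : x = v
      · subst hvx
        have hd : d.get? x = none := by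
          rw [PySem.Dict.get?_eq_none_iff_contains]; exact Bool.eq_false_iff.mpr hc ▸ rfl
        rw [PySem.Dict.get?_insert_self]
        simp [pvFidx, hd]
      · rw [PySem.Dict.get?_insert_of_ne _ _ (Ne.symm hvx)]
        cases h : d.get? v with
        | some j => rfl
        | none => simp [pvFidx, hvx]

theorem pvFidx_none (v : Int) (p : List Int) (h : v ∉ p) : ∀ s, pvFidx v p s = none := by
  induction p with
  | nil => intro s; rfl
  | cons x t ih =>
    intro s
    have hx : x ≠ v := by rintro rfl; exact h (List.mem_cons_self)
    simp only [pvFidx, if_neg hx]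
    exact ih (fun hm => h (List.mem_cons_of_mem _ hm)) (s + 1)

theorem pvFidx_lt (v : Int) (p : List Int) (h : v ∈ p) :
    ∀ s, ∃ j, pvFidx v p s = some j ∧ j < s + p.length := by
  induction p with
  | nil => cases h
  | cons x t ih =>
    intro s
    by_cases hx : x = v
    · refine ⟨s, by simp [pvFidx, hx], by simp only [List.length_cons]; push_cast; omega⟩
    · have hm : v ∈ t := by
        rcases List.mem_cons.mp h with he | hm
        · exact absurd he.symm hx
        · exact hm
      obtain ⟨j, hj, hlt⟩ := ih hm (s + 1)
      refine ⟨j, by simp [pvFidx, hx, hj], by simp at hlt ⊢; omega⟩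

theorem pvFidx_append (v : Int) (p : List Int) : ∀ (q : List Int) (s : Int),
    pvFidx v (p ++ q) s =
      match pvFidx v p s with
      | some j => some j
      | none => pvFidx v q (s + p.length) := by
  induction p with
  | nil => intro q s; simp [pvFidx]
  | cons x t ih =>
    intro q s
    by_cases hx : x = v
    · simp [pvFidx, hx]
    · simp only [List.cons_append, pvFidx, if_neg hx, ih]
      cases pvFidx v t (s + 1) with
      | some j => rfl
      | none =>
        have he : s + 1 + (t.length : Int) = s + ((x :: t).length : Int) := by
          simp only [List.length_cons]
          push_cast
          ring
        rw [he]

theorem pvFirstIdx_get (lst : List Int) (v : Int) :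
    (pvFirstIdx lst).get? v = pvFidx v lst 0 := by
  rw [pvFirstIdx, pvFold_get]
  simp [PySem.Dict.get?_empty]

theorem pvB_map_eq_mid (m : Int) (lst : List Int) (t : List Int) : ∀ pre : List Int,
    lst = pre ++ t →
    (PySem.List.enumerate t (pre.length : Int)).map
      (fun iv => if (pvFirstIdx lst).get? iv.2 = some iv.1 then iv.2 else m) = pvMid m pre t := by
  induction t with
  | nil => intro pre _; rfl
  | cons v t ih =>
    intro pre hl
    rw [PySem.List.enumerate_cons]
    simp only [List.map_cons, pvMid]
    congr 1
    · -- head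
      rw [pvFirstIdx_get, hl, pvFidx_append]
      by_cases h : v ∈ pre
      · obtain ⟨j, hj, hlt⟩ := pvFidx_lt v pre h 0
        rw [hj]
        simp only [if_pos h]
        rw [if_neg]
        intro he
        have hje : j = (pre.length : Int) := Option.some.inj he
        omega
      · rw [pvFidx_none v pre h 0]
        simp [pvFidx, h]
    · -- tail
      have h1 : ((pre.length : Int) + 1) = (((pre ++ [v]).length : Int)) := by simp
      rw [h1]
      exact ih (pre ++ [v]) (by simp [hl])

theorem pvA_eq_B (lst : List Int) : replace_duplicates_with_max lst = replace_duplicates_with_max_alt lst := by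
  unfold replace_duplicates_with_max replace_duplicates_with_max_alt
  cases h : PySem.List.max? lst (fun x => x) with
  | none => rfl
  | some m =>
    have hA := pvLoopA_eq_mid m lst []
    have hB := pvB_map_eq_mid m lst lst [] rfl
    simp only [PySem.Set.ofList] at hA
    simpa [hA] using hB.symm ▸ hA

-- ===== VERDICT (by name: the statement is the Claim_ definition above) =====
theorem replace_duplicates_with_max_spec : Claim_equal_replace_duplicates_with_max := by
  intro lst _ _
  unfold Spec_replace_duplicates_with_max
  exact pvA_eq_B lst
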